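-- pv_equiv track=rewrite | github.com/RaviSoni804426/SPACEIQ-FULL-PROJECT | spaceiq/backend/routers/chat.py | _tokenize_search_terms
-- ===== SOURCE A (Python) =====
-- def _tokenize_search_terms(message: str) -> list[str]:
--     stop_words = {
--         "find",
--         "show",
--         "suggest",
--         "book",
--         "for",
--         "me",
--         "please",
--         "need",
--         "want",
--         "space",
--         "spaces",
--         "area",
--         "wise",
--         "in",
--         "the",
--         "a",
--         "an",
--     }
--     words = [
--         word
--         for word in "".join(ch if ch.isalnum() or ch.isspace() else " " for ch in message.lower()).split()
--         if len(word) > 2 and word not in stop_words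
--     ]
--     return words[:5]
-- ===== SOURCE B (Python) =====
-- def _tokenize_search_terms(message: str) -> list[str]:
--     stop_words = {
--         "find", "show", "suggest", "book", "for", "me", "please", "need",
--         "want", "space", "spaces", "area", "wise", "in", "the", "a", "an",
--     }
--     out = []
--     buf = []
--     for ch in message.lower():
--         if ch.isalnum():
--             buf.append(ch)
--             continue
--         tok = "".join(buf)
--         buf = []
--         if len(tok) > 2 and tok not in stop_words:
--             out.append(tok)
--             if len(out) == 5:
--                 return out
--     tok = "".join(buf)
--     if len(tok) > 2 and tok not in stop_words:
--         out.append(tok)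
--     return out
-- ===== Notes on version B (the rewrite author's own statement) =====
-- stated objective: alternative
-- what changed: Replaced A's build-a-mapped-string-then-split-then-filter-then-slice pipeline by a single-pass character state machine that accumulates alnum runs, filters each completed token on the fly, and returns early once five tokens are collected.
import Mathlib
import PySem

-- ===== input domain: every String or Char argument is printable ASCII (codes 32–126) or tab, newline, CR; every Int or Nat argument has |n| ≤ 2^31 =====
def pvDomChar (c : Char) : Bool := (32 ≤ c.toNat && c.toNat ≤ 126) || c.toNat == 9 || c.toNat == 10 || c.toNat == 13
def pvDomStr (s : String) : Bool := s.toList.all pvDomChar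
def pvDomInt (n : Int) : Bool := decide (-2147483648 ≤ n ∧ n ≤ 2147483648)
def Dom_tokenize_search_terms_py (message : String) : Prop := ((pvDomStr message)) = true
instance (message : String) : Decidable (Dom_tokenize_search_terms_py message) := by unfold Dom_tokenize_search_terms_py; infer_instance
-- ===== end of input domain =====

-- B replaces A's join-then-split comprehension by a single-pass character state machine
-- that flushes alnum runs, filters them on the fly and stops after five tokens (objective: alternative).

-- ===== PORT A =====
def stopWordsA : PySem.Set String :=
  PySem.Set.ofList ["find", "show", "suggest", "book", "for", "me", "please", "need",
    "want", "space", "spaces", "area", "wise", "in", "the", "a", "an"]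

def tokenize_search_terms_py (message : String) : List String :=
  -- "".join(ch if ch.isalnum() or ch.isspace() else " " for ch in message.lower())
  let joined : String :=
    String.ofList ((PySem.Str.lower message).toList.map
      (fun ch => if PySem.Chars.isalnum ch || PySem.Chars.isspace ch then ch else ' '))
  let words : List String :=
    (PySem.Str.split₀ joined).filter
      (fun word => decide (2 < PySem.Str.len word) && !(PySem.Set.contains stopWordsA word))
  PySem.List.slice words none (some 5)

-- ===== PORT B =====
def stopWordsB : PySem.Set String :=
  PySem.Set.ofList ["find", "show", "suggest", "book", "for", "me", "please", "need",
    "want", "space", "spaces", "area", "wise", "in", "the", "a", "an"]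

-- the for-loop of Source B: state = (current alnum-run buffer, collected tokens)
def altLoop (cs : List Char) (buf : List Char) (out : List String) : List String :=
  match cs with
  | [] =>
      let tok := String.ofList buf
      if decide (2 < PySem.Str.len tok) && !(PySem.Set.contains stopWordsB tok) then
        out ++ [tok]
      else out
  | ch :: rest =>
      if PySem.Chars.isalnum ch then
        altLoop rest (buf ++ [ch]) out
      else
        let tok := String.ofList buf
        if decide (2 < PySem.Str.len tok) && !(PySem.Set.contains stopWordsB tok) then
          let out' := out ++ [tok]
          if out'.length == 5 then out' else altLoop rest [] out'
        else altLoop rest [] out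

def tokenize_search_terms_py_alt (message : String) : List String :=
  altLoop (PySem.Str.lower message).toList [] []

-- ===== PRECONDITION & SPEC =====
def Spec_tokenize_search_terms_py (message : String) (out : List String) : Prop := out = tokenize_search_terms_py_alt message
instance (message : String) (out : List String) : Decidable (Spec_tokenize_search_terms_py message out) := by unfold Spec_tokenize_search_terms_py; infer_instance

-- ===== CLAIM (what is proved, stated in full; the proofs are below) =====
def Claim_equal_tokenize_search_terms_py : Prop := ∀ (message : String), Dom_tokenize_search_terms_py message → Spec_tokenize_search_terms_py message (tokenize_search_terms_py message)

-- ===== LEMMAS AND PROOFS =====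

-- reference tokenizer: the maximal alnum runs of cs, with cur the run in progress
def runsFrom (cs : List Char) (cur : List Char) : List (List Char) :=
  match cs with
  | [] => if cur = [] then [] else [cur]
  | c :: rest =>
      if PySem.Chars.isalnum c then runsFrom rest (cur ++ [c])
      else (if cur = [] then [] else [cur]) ++ runsFrom rest []

def predTok (w : String) : Bool :=
  decide (2 < PySem.Str.len w) && !(PySem.Set.contains stopWordsB w)

theorem alnum_not_space (c : Char) (h : PySem.Chars.isalnum c = true) :
    PySem.Chars.isspace c = false := by
  have ec : c.toNat = c.val.toNat := rfl
  have e0 : '0'.val.toNat = 48 := rfl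
  have e9 : '9'.val.toNat = 57 := rfl
  have eA : 'A'.val.toNat = 65 := rfl
  have eZ : 'Z'.val.toNat = 90 := rfl
  have ea : 'a'.val.toNat = 97 := rfl
  have ez : 'z'.val.toNat = 122 := rfl
  have hx : (48 ≤ c.toNat ∧ c.toNat ≤ 57) ∨ (65 ≤ c.toNat ∧ c.toNat ≤ 90) ∨
      (97 ≤ c.toNat ∧ c.toNat ≤ 122) := by
    simp only [PySem.Chars.isalnum, PySem.Chars.isalpha, PySem.Chars.isdigit,
      PySem.Chars.isupper, PySem.Chars.islower, Bool.or_eq_true, Bool.and_eq_true,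
      decide_eq_true_eq, Char.le_def, UInt32.le_iff_toNat_le] at h
    omega
  cases hsp : PySem.Chars.isspace c with
  | false => rfl
  | true =>
      exfalso
      simp only [PySem.Chars.isspace, Bool.or_eq_true, Bool.and_eq_true,
        decide_eq_true_eq] at hsp
      omega

theorem split_go_nil (cur : List Char) (acc : List (List Char)) :
    PySem.Chars.split₀.go [] cur acc =
      if cur.isEmpty then acc.reverse else (cur.reverse :: acc).reverse := rfl

theorem split_go_cons (x : Char) (l cur : List Char) (acc : List (List Char)) :
    PySem.Chars.split₀.go (x :: l) cur acc =
      if PySem.Chars.isspace x then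
        (if cur.isEmpty then PySem.Chars.split₀.go l [] acc
         else PySem.Chars.split₀.go l [] (cur.reverse :: acc))
      else PySem.Chars.split₀.go l (x :: cur) acc := rfl

-- A's split₀ of the mapped string computes the alnum runs
theorem go_map_eq (cs cur acc) :
    PySem.Chars.split₀.go
      (cs.map (fun ch => if PySem.Chars.isalnum ch || PySem.Chars.isspace ch then ch else ' '))
      cur acc = acc.reverse ++ runsFrom cs cur.reverse := by
  induction cs generalizing cur acc with
  | nil =>
      rw [List.map_nil, split_go_nil]
      simp only [runsFrom]
      by_cases h : cur = [] <;> simp [h, List.isEmpty_iff]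
  | cons c rest ih =>
      rw [List.map_cons, split_go_cons]
      simp only [runsFrom]
      by_cases ha : PySem.Chars.isalnum c
      · have hs := alnum_not_space c ha
        have hc : (if (PySem.Chars.isalnum c || PySem.Chars.isspace c) = true then c else ' ') = c := by
          simp [ha]
        rw [hc, if_neg (by simp [hs]), ih (c :: cur) acc]
        simp [ha]
      · have hsep : PySem.Chars.isspace
            (if PySem.Chars.isalnum c || PySem.Chars.isspace c then c else ' ') = true := by
          by_cases hs : PySem.Chars.isspace c
          · simp [hs]
          · simp [ha, hs]; decide
        rw [if_pos hsep]
        by_cases h : cur = []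
        · rw [if_pos (by simp [h]), ih [] acc]
          simp [ha, h]
        · rw [if_neg (by simp [List.isEmpty_iff, h]), ih [] (cur.reverse :: acc)]
          simp [ha, h]

-- B's loop is the filtered runs, truncated to five
theorem altLoop_eq (cs buf out) (h : out.length < 5) :
    altLoop cs buf out =
      (out ++ ((runsFrom cs buf).map String.ofList).filter predTok).take 5 := by
  induction cs generalizing buf out with
  | nil =>
      simp only [altLoop, runsFrom]
      by_cases hp : predTok (String.ofList buf)
      · have hb : buf ≠ [] := by intro hbe; subst hbe; revert hp; decide
        rw [if_pos (by simpa [predTok] using hp)]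
        have hf : List.filter predTok (List.map String.ofList
            (if buf = [] then [] else [buf])) = [String.ofList buf] := by
          simp [hb, hp]
        rw [hf, List.take_of_length_le (by simp; omega)]
      · rw [if_neg (by simpa [predTok] using hp)]
        by_cases hb : buf = [] <;>
          simp [hb, hp, List.take_of_length_le (Nat.le_of_lt h)]
  | cons c rest ih =>
      simp only [altLoop, runsFrom]
      by_cases ha : PySem.Chars.isalnum c
      · rw [if_pos ha, if_pos ha, ih _ _ h]
      · rw [if_neg ha, if_neg ha]
        by_cases hp : predTok (String.ofList buf)
        · have hb : buf ≠ [] := by intro hbe; subst hbe; revert hp; decide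
          rw [if_pos (by simpa [predTok] using hp)]
          by_cases h5 : (out ++ [String.ofList buf]).length = 5
          · rw [if_pos (by simp [h5])]
            have : out ++ List.filter predTok
                (List.map String.ofList ((if buf = [] then [] else [buf]) ++ runsFrom rest []))
                = (out ++ [String.ofList buf]) ++
                  List.filter predTok (List.map String.ofList (runsFrom rest [])) := by
              simp [hb, hp]
            rw [this, List.take_left' h5]
          · have h5' : ¬ out.length + 1 = 5 := by simpa using h5
            rw [if_neg (by simp; omega)]
            have hlt : (out ++ [String.ofList buf]).length < 5 := by
              simp; omega
            rw [ih [] _ hlt]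
            simp [hb, hp]
        · rw [if_neg (by simpa [predTok] using hp)]
          rw [ih [] _ h]
          by_cases hb : buf = [] <;> simp [hb, hp]

theorem stop_eq : stopWordsA = stopWordsB := rfl

-- ===== VERDICT (by name: the statement is the Claim_ definition above) =====
theorem tokenize_search_terms_py_spec : Claim_equal_tokenize_search_terms_py := by
  intro message _
  unfold Spec_tokenize_search_terms_py tokenize_search_terms_py tokenize_search_terms_py_alt
  rw [altLoop_eq _ _ _ (by simp)]
  simp only [PySem.Str.split₀, PySem.Str.lower, String.toList_ofList, PySem.Chars.split₀]
  rw [go_map_eq]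
  rw [PySem.List.slice_to _ (b := 5) (by norm_num)]
  simp only [stop_eq, List.nil_append, List.reverse_nil]
  congr 1
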